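-- pv_equiv track=rewrite | github.com/evariste/ma | code/number_theory/lifting_square_roots.py | a_plus_b_root_z_power_k_mod_n
-- ===== SOURCE A (Python) =====
-- def a_plus_b_root_z_squared_mod_n(a, b, z, n):
--     """
--     Given x = (a + b sqrt(z))
--     Find x^2 = c + d sqrt(z)
--     where c = a^2 + b^2 z
--     and d = 2 a b
--     are the reduced coefficients mod n
--     :return: (c, d)
--     """
--
--     c = (a**2 + b**2 * z) % n
--     d = ( 2 * a * b ) % n
--     return c, d
--
-- def prod_as_plus_bs_root_z_mod_n(a1, b1, a2, b2, z, n):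
--     """
--     Given x = a1 + b1 sqrt(z) and y = a2 + b2 sqrt(z)
--     Find x y = c + d sqrt(z)
--     Where c = a1 a2 + b1 b2 z
--     and d = a1 b2 + a2 b1
--     are reduced mod n
--     :return: (c, d)
--     """
--     c = (a1 * a2 + b1 * b2 * z) % n
--     d = (a1 * b2 + a2 * b1) % n
--     return c, d
--
-- def a_plus_b_root_z_power_k_mod_n(a, b, z, k, n):
--     """
--     Given x = (a + b sqrt(z))
--     Find x^k in the form c + d sqrt(z)
--     where c and d are the reduced coefficients mod n
--     :return: (c, d)
--     """
--
--     # Use successive squaring.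
--
--     # current power
--     p = 1
--
--     x = (a, b)
--
--     val = (1, 0)
--     while p <= k:
--         if k & p:
--             # accumulate
--             val = prod_as_plus_bs_root_z_mod_n(val[0], val[1], x[0], x[1], z, n)
--
--         x = a_plus_b_root_z_squared_mod_n(x[0], x[1], z, n)
--
--         p *= 2
--
--     return val
-- ===== SOURCE B (Python) =====
-- def a_plus_b_root_z_power_k_mod_n(a, b, z, k, n):
--     """
--     x = a + b sqrt(z); return x^k mod n as (c, d) with x^k = c + d sqrt(z).
--     Recursive divide-and-conquer fast power: square the result for k//2,
--     then multiply once more by (a, b) if k is odd.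
--     """
--     if k <= 0:
--         return (1, 0)
--     c, d = a_plus_b_root_z_power_k_mod_n(a, b, z, k // 2, n)
--     c, d = (c * c + d * d * z) % n, (2 * (c * d)) % n
--     if k % 2:
--         c, d = (c * a + d * b * z) % n, (c * b + a * d) % n
--     return (c, d)
-- ===== Notes on version B (the rewrite author's own statement) =====
-- stated objective: alternative
-- what changed: Replaced the bottom-up LSB bit-mask loop (explicit power-of-two counter p and accumulator pair) with a top-down recursion on k//2 that squares the recursive result and multiplies by the base once when k is odd.
import Mathlib
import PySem

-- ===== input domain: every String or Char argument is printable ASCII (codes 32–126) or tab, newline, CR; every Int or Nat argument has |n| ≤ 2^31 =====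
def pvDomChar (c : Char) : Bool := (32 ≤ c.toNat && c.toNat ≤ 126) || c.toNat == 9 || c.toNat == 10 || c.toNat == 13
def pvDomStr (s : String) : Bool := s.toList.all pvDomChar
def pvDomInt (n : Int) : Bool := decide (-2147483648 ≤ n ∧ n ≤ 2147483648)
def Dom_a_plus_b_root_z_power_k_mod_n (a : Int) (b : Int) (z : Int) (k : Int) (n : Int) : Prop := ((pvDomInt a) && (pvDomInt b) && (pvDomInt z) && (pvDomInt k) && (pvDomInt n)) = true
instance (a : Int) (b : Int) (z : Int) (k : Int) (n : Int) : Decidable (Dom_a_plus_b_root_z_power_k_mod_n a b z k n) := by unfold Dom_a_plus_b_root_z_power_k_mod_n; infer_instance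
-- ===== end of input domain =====

-- B rewrites A's bottom-up bit-mask successive-squaring loop as a top-down
-- recursion on k//2 (square the recursive result, multiply once by the base if
-- k is odd); same mod-n formulas, objective: alternative decomposition.

-- ===== PORT A =====
-- a_plus_b_root_z_squared_mod_n
def pvSqA (a : Int) (b : Int) (z : Int) (n : Int) : Int × Int :=
  (PySem.Int.mod (a ^ 2 + b ^ 2 * z) n, PySem.Int.mod (2 * a * b) n)

-- prod_as_plus_bs_root_z_mod_n
def pvProdA (a1 : Int) (b1 : Int) (a2 : Int) (b2 : Int) (z : Int) (n : Int) : Int × Int :=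
  (PySem.Int.mod (a1 * a2 + b1 * b2 * z) n, PySem.Int.mod (a1 * b2 + a2 * b1) n)

-- the while loop of A: state (p, x, val); p starts at 1 and doubles, so 0 < p is invariant
def pvLoopA (z : Int) (n : Int) (k : Int) (p : Int) (hp : 0 < p) (x : Int × Int) (val : Int × Int) : Int × Int :=
  if h : p ≤ k then
    pvLoopA z n k (p * 2) (by omega)
      (pvSqA x.1 x.2 z n)
      (if PySem.Int.band k p ≠ 0 then pvProdA val.1 val.2 x.1 x.2 z n else val)
  else val
termination_by (k + 1 - p).toNat
decreasing_by omega

def a_plus_b_root_z_power_k_mod_n (a : Int) (b : Int) (z : Int) (k : Int) (n : Int) : Int × Int :=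
  pvLoopA z n k 1 (by omega) (a, b) (1, 0)

-- ===== PORT B =====
def a_plus_b_root_z_power_k_mod_n_alt (a : Int) (b : Int) (z : Int) (k : Int) (n : Int) : Int × Int :=
  if k ≤ 0 then (1, 0)
  else
    let cd := a_plus_b_root_z_power_k_mod_n_alt a b z (PySem.Int.floordiv k 2) n
    let c := PySem.Int.mod (cd.1 * cd.1 + cd.2 * cd.2 * z) n
    let d := PySem.Int.mod (2 * (cd.1 * cd.2)) n
    if PySem.Int.mod k 2 ≠ 0 then
      (PySem.Int.mod (c * a + d * b * z) n, PySem.Int.mod (c * b + a * d) n)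
    else (c, d)
termination_by k.toNat
decreasing_by
  rw [PySem.Int.floordiv_eq_ediv_of_pos (by omega)]
  omega

-- ===== PRECONDITION & SPEC =====
-- Pre_ excludes exactly the inputs where Python raises ZeroDivisionError:
-- when k >= 1 the loop body reduces mod n, so n must be nonzero there.
def Pre_a_plus_b_root_z_power_k_mod_n (a : Int) (b : Int) (z : Int) (k : Int) (n : Int) : Prop :=
  1 ≤ k → n ≠ 0
instance (a : Int) (b : Int) (z : Int) (k : Int) (n : Int) : Decidable (Pre_a_plus_b_root_z_power_k_mod_n a b z k n) := by unfold Pre_a_plus_b_root_z_power_k_mod_n; infer_instance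

def pvWitness_a_plus_b_root_z_power_k_mod_n : Int × Int × Int × Int × Int := (2, 3, 5, 10, 7)

def Spec_a_plus_b_root_z_power_k_mod_n (a : Int) (b : Int) (z : Int) (k : Int) (n : Int) (out : Int × Int) : Prop := out = a_plus_b_root_z_power_k_mod_n_alt a b z k n
instance (a : Int) (b : Int) (z : Int) (k : Int) (n : Int) (out : Int × Int) : Decidable (Spec_a_plus_b_root_z_power_k_mod_n a b z k n out) := by unfold Spec_a_plus_b_root_z_power_k_mod_n; infer_instance

-- ===== CLAIM (what is proved, stated in full; the proofs are below) =====
def Claim_equal_a_plus_b_root_z_power_k_mod_n : Prop := ∀ (a : Int) (b : Int) (z : Int) (k : Int) (n : Int), Dom_a_plus_b_root_z_power_k_mod_n a b z k n → Pre_a_plus_b_root_z_power_k_mod_n a b z k n → Spec_a_plus_b_root_z_power_k_mod_n a b z k n (a_plus_b_root_z_power_k_mod_n a b z k n)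

-- ===== LEMMAS AND PROOFS =====

-- exact (unreduced) arithmetic in Z[sqrt z]
def pvMulZ (z : Int) (x : Int × Int) (y : Int × Int) : Int × Int :=
  (x.1 * y.1 + x.2 * y.2 * z, x.1 * y.2 + y.1 * x.2)

def pvPowZ (z : Int) (x : Int × Int) : Nat → Int × Int
  | 0 => (1, 0)
  | m + 1 => pvMulZ z x (pvPowZ z x m)

def pvRed (n : Int) (x : Int × Int) : Int × Int := (PySem.Int.mod x.1 n, PySem.Int.mod x.2 n)

-- componentwise congruence mod n
def pvCong (n : Int) (x : Int × Int) (y : Int × Int) : Prop :=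
  n ∣ (x.1 - y.1) ∧ n ∣ (x.2 - y.2)

theorem pvMod_sub_dvd (a n : Int) : n ∣ (PySem.Int.mod a n - a) := by
  refine ⟨-(PySem.Int.floordiv a n), ?_⟩
  have h := PySem.Int.floordiv_mul_add_mod a n
  linarith [h]

theorem pvCong_refl (n : Int) (x : Int × Int) : pvCong n x x := by
  constructor <;> simp

theorem pvCong_trans {n : Int} {x y w : Int × Int} (h1 : pvCong n x y) (h2 : pvCong n y w) :
    pvCong n x w := by
  obtain ⟨a1, a2⟩ := h1; obtain ⟨b1, b2⟩ := h2
  constructor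
  · have := dvd_add a1 b1; simpa using this
  · have := dvd_add a2 b2; simpa using this

theorem pvRed_cong (n : Int) (x : Int × Int) : pvCong n (pvRed n x) x :=
  ⟨pvMod_sub_dvd x.1 n, pvMod_sub_dvd x.2 n⟩

theorem pvMulZ_cong {n z : Int} {x x' y y' : Int × Int}
    (hx : pvCong n x x') (hy : pvCong n y y') :
    pvCong n (pvMulZ z x y) (pvMulZ z x' y') := by
  obtain ⟨hx1, hx2⟩ := hx; obtain ⟨hy1, hy2⟩ := hy
  constructor
  · have h : (pvMulZ z x y).1 - (pvMulZ z x' y').1 =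
      y.1 * (x.1 - x'.1) + x'.1 * (y.1 - y'.1) + (y.2 * z) * (x.2 - x'.2) + (x'.2 * z) * (y.2 - y'.2) := by
      simp only [pvMulZ]; ring
    rw [h]
    exact dvd_add (dvd_add (dvd_add (hx1.mul_left _) (hy1.mul_left _)) (hx2.mul_left _)) (hy2.mul_left _)
  · have h : (pvMulZ z x y).2 - (pvMulZ z x' y').2 =
      y.2 * (x.1 - x'.1) + x'.1 * (y.2 - y'.2) + y.1 * (x.2 - x'.2) + x'.2 * (y.1 - y'.1) := by
      simp only [pvMulZ]; ring
    rw [h]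
    exact dvd_add (dvd_add (dvd_add (hx1.mul_left _) (hy2.mul_left _)) (hx2.mul_left _)) (hy1.mul_left _)

theorem pvMod_eq_of_dvd {n u v : Int} (hn : n ≠ 0) (h : n ∣ (u - v)) :
    PySem.Int.mod u n = PySem.Int.mod v n := by
  have hu := pvMod_sub_dvd u n
  have hv := pvMod_sub_dvd v n
  have hd : n ∣ (PySem.Int.mod u n - PySem.Int.mod v n) := by
    have he : PySem.Int.mod u n - PySem.Int.mod v n =
        (PySem.Int.mod u n - u) + (u - v) - (PySem.Int.mod v n - v) := by ring
    rw [he]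
    exact dvd_sub (dvd_add hu h) hv
  have hz : PySem.Int.mod u n - PySem.Int.mod v n = 0 := by
    rcases lt_or_gt_of_ne hn with hneg | hpos
    · obtain ⟨b1a, b1b⟩ := PySem.Int.mod_neg_bounds u hneg
      obtain ⟨b2a, b2b⟩ := PySem.Int.mod_neg_bounds v hneg
      exact Int.eq_zero_of_abs_lt_dvd (neg_dvd.mpr hd) (by rw [abs_lt]; omega)
    · have b1n := PySem.Int.mod_nonneg u hpos
      have b1l := PySem.Int.mod_lt u hpos
      have b2n := PySem.Int.mod_nonneg v hpos
      have b2l := PySem.Int.mod_lt v hpos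
      exact Int.eq_zero_of_abs_lt_dvd hd (by rw [abs_lt]; omega)
  omega

theorem pvRed_eq_of_cong {n : Int} (hn : n ≠ 0) {x y : Int × Int} (h : pvCong n x y) :
    pvRed n x = pvRed n y := by
  obtain ⟨h1, h2⟩ := h
  simp [pvRed, pvMod_eq_of_dvd hn h1, pvMod_eq_of_dvd hn h2]

theorem pvMulZ_one_left (z : Int) (y : Int × Int) : pvMulZ z (1, 0) y = y := by
  simp [pvMulZ]

theorem pvMulZ_one_right (z : Int) (x : Int × Int) : pvMulZ z x (1, 0) = x := by
  simp [pvMulZ]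

theorem pvMulZ_assoc (z : Int) (x y w : Int × Int) :
    pvMulZ z (pvMulZ z x y) w = pvMulZ z x (pvMulZ z y w) := by
  simp only [pvMulZ, Prod.mk.injEq]
  constructor <;> ring

theorem pvPowZ_one (z : Int) (x : Int × Int) : pvPowZ z x 1 = x := by
  simp [pvPowZ, pvMulZ_one_right]

theorem pvPowZ_add (z : Int) (x : Int × Int) (m1 m2 : Nat) :
    pvPowZ z x (m1 + m2) = pvMulZ z (pvPowZ z x m1) (pvPowZ z x m2) := by
  induction m1 with
  | zero => simp [pvPowZ, pvMulZ_one_left]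
  | succ m ih =>
    have he : m + 1 + m2 = (m + m2) + 1 := by omega
    rw [he]
    show pvMulZ z x (pvPowZ z x (m + m2)) = _
    rw [ih]
    show pvMulZ z x (pvMulZ z (pvPowZ z x m) (pvPowZ z x m2)) =
      pvMulZ z (pvMulZ z x (pvPowZ z x m)) (pvPowZ z x m2)
    rw [pvMulZ_assoc]

-- B's recursion computes red (powZ k.toNat) for k >= 1
theorem pvAlt_eq (a b z n : Int) (hn : n ≠ 0) :
    ∀ K : Nat, ∀ k : Int, k.toNat = K → 1 ≤ k →
    a_plus_b_root_z_power_k_mod_n_alt a b z k n = pvRed n (pvPowZ z (a, b) K) := by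
  intro K
  induction K using Nat.strong_induction_on with
  | _ K ih =>
    intro k hK hk
    rw [a_plus_b_root_z_power_k_mod_n_alt]
    rw [if_neg (by omega : ¬ k ≤ 0)]
    have hfd : PySem.Int.floordiv k 2 = ((K / 2 : Nat) : Int) := by
      rw [PySem.Int.floordiv_eq_ediv_of_pos (by omega : (0:Int) < 2)]
      omega
    have hcd : pvCong n (a_plus_b_root_z_power_k_mod_n_alt a b z (PySem.Int.floordiv k 2) n)
        (pvPowZ z (a, b) (K / 2)) := by
      by_cases h2 : K / 2 = 0
      · have he : a_plus_b_root_z_power_k_mod_n_alt a b z (PySem.Int.floordiv k 2) n = (1, 0) := by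
          rw [a_plus_b_root_z_power_k_mod_n_alt, if_pos (by rw [hfd, h2]; simp)]
        rw [he, h2]
        exact pvCong_refl n (1, 0)
      · have := ih (K / 2) (by omega) ((K / 2 : Nat) : Int) (by omega) (by omega)
        rw [hfd, this]
        exact pvRed_cong n _
    set R := a_plus_b_root_z_power_k_mod_n_alt a b z (PySem.Int.floordiv k 2) n with hR
    have hcdpair : (PySem.Int.mod (R.1 * R.1 + R.2 * R.2 * z) n, PySem.Int.mod (2 * (R.1 * R.2)) n)
        = pvRed n (pvMulZ z R R) := by
      show _ = (PySem.Int.mod (R.1 * R.1 + R.2 * R.2 * z) n,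
        PySem.Int.mod (R.1 * R.2 + R.1 * R.2) n)
      rw [show (2:Int) * (R.1 * R.2) = R.1 * R.2 + R.1 * R.2 from by ring]
    have hsqc : pvCong n (pvRed n (pvMulZ z R R)) (pvPowZ z (a, b) (K / 2 + K / 2)) := by
      refine pvCong_trans (pvRed_cong n _) ?_
      rw [pvPowZ_add]
      exact pvMulZ_cong hcd hcd
    have hpar : (PySem.Int.mod k 2 ≠ 0) ↔ K % 2 = 1 := by
      rw [PySem.Int.mod_eq_emod_of_pos (by omega : (0:Int) < 2)]
      omega
    by_cases hodd : PySem.Int.mod k 2 ≠ 0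
    · rw [if_pos hodd]
      have hO : (PySem.Int.mod (PySem.Int.mod (R.1 * R.1 + R.2 * R.2 * z) n * a +
            PySem.Int.mod (2 * (R.1 * R.2)) n * b * z) n,
          PySem.Int.mod (PySem.Int.mod (R.1 * R.1 + R.2 * R.2 * z) n * b +
            a * PySem.Int.mod (2 * (R.1 * R.2)) n) n)
          = pvRed n (pvMulZ z (PySem.Int.mod (R.1 * R.1 + R.2 * R.2 * z) n,
              PySem.Int.mod (2 * (R.1 * R.2)) n) (a, b)) := rfl
      rw [hO, hcdpair]
      apply pvRed_eq_of_cong hn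
      have h1 : pvCong n (pvMulZ z (pvRed n (pvMulZ z R R)) (a, b))
          (pvMulZ z (pvPowZ z (a, b) (K / 2 + K / 2)) (pvPowZ z (a, b) 1)) := by
        rw [pvPowZ_one]
        exact pvMulZ_cong hsqc (pvCong_refl n (a, b))
      rw [← pvPowZ_add] at h1
      have hKe : K / 2 + K / 2 + 1 = K := by omega
      rwa [hKe] at h1
    · rw [if_neg hodd, hcdpair]
      apply pvRed_eq_of_cong hn
      have hKe : K / 2 + K / 2 = K := by omega
      rw [← hKe, pvPowZ_add]
      exact pvMulZ_cong hcd hcd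

-- A's loop invariant: with p = 2^i and x congruent to base^(2^i),
-- the loop returns val * base^(2^i * (k.toNat >>> i)) reduced mod n
theorem pvLoop_eq (base : Int × Int) (z n k : Int) (hn : n ≠ 0) (hk : 0 ≤ k) :
    ∀ m : Nat, ∀ (i : Nat) (p : Int) (hp : 0 < p) (x val : Int × Int),
      p = 2 ^ i → k.toNat >>> i = m → pvCong n x (pvPowZ z base (2 ^ i)) →
      (m ≠ 0 → pvLoopA z n k p hp x val =
        pvRed n (pvMulZ z val (pvPowZ z base (2 ^ i * m)))) ∧
      (m = 0 → pvLoopA z n k p hp x val = val) := by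
  intro m
  induction m using Nat.strong_induction_on with
  | _ m ih =>
    intro i p hp x val hpe hsh hx
    have hPn : ((2 ^ i : Nat) : Int) = p := by rw [hpe]; push_cast; ring
    have hP : (0:Nat) < 2 ^ i := Nat.two_pow_pos i
    have hdiv : k.toNat >>> i = k.toNat / 2 ^ i := Nat.shiftRight_eq_div_pow _ _
    have hle : (p ≤ k) ↔ m ≠ 0 := by
      rw [hdiv] at hsh
      constructor
      · intro h hm0
        rw [hm0] at hsh
        have hlt : k.toNat < 2 ^ i := by
          rcases Nat.div_eq_zero_iff.mp hsh with h' | h'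
          · omega
          · exact h'
        omega
      · intro hm0
        by_contra hcon
        have h1 : k.toNat < 2 ^ i := by omega
        have h2 : k.toNat / 2 ^ i = 0 := Nat.div_eq_of_lt h1
        omega
    rw [pvLoopA]
    by_cases hm : m = 0
    · rw [dif_neg (by rw [hle]; simp [hm])]
      exact ⟨fun h => absurd hm h, fun _ => rfl⟩
    · rw [dif_pos (hle.mpr hm)]
      have hx' : pvCong n (pvSqA x.1 x.2 z n) (pvPowZ z base (2 ^ (i + 1))) := by
        have he : pvSqA x.1 x.2 z n = pvRed n (pvMulZ z x x) := by
          show (PySem.Int.mod (x.1 ^ 2 + x.2 ^ 2 * z) n, PySem.Int.mod (2 * x.1 * x.2) n) =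
            (PySem.Int.mod (x.1 * x.1 + x.2 * x.2 * z) n, PySem.Int.mod (x.1 * x.2 + x.1 * x.2) n)
          rw [show x.1 ^ 2 + x.2 ^ 2 * z = x.1 * x.1 + x.2 * x.2 * z from by ring,
            show (2:Int) * x.1 * x.2 = x.1 * x.2 + x.1 * x.2 from by ring]
        rw [he]
        refine pvCong_trans (pvRed_cong n _) ?_
        have h1 : pvCong n (pvMulZ z x x) (pvPowZ z base (2 ^ i + 2 ^ i)) := by
          rw [pvPowZ_add]; exact pvMulZ_cong hx hx
        have h2 : 2 ^ i + 2 ^ i = 2 ^ (i + 1) := by rw [pow_succ]; omega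
        rwa [h2] at h1
      have hsh' : k.toNat >>> (i + 1) = m / 2 := by
        rw [Nat.shiftRight_eq_div_pow, pow_succ, ← Nat.div_div_eq_div_mul, ← hdiv, hsh]
      have hbit : (PySem.Int.band k p ≠ 0) ↔ m % 2 = 1 := by
        have hb : PySem.Int.band k p = ((k.toNat &&& p.toNat : Nat) : Int) :=
          PySem.Int.band_of_nonneg hk (by omega)
        have hpt : p.toNat = 2 ^ i := by omega
        rw [hb, hpt, Nat.and_two_pow]
        rw [Nat.testBit_eq_decide_div_mod_eq, ← hdiv, hsh]
        by_cases h : m % 2 = 1 <;> simp [h]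
      by_cases hodd : PySem.Int.band k p ≠ 0
      · rw [if_pos hodd]
        have hm2 : m % 2 = 1 := hbit.mp hodd
        have ihh := ih (m / 2) (by omega) (i + 1) (p * 2) (by omega)
          (pvSqA x.1 x.2 z n) (pvProdA val.1 val.2 x.1 x.2 z n)
          (by rw [hpe, pow_succ]) hsh' hx'
        have hvp : pvProdA val.1 val.2 x.1 x.2 z n = pvRed n (pvMulZ z val x) := rfl
        by_cases hm2z : m / 2 = 0
        · refine ⟨fun _ => ?_, fun h => absurd h hm⟩
          rw [ihh.2 hm2z, hvp]
          apply pvRed_eq_of_cong hn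
          have hm1 : m = 1 := by omega
          rw [hm1, mul_one]
          exact pvMulZ_cong (pvCong_refl n val) hx
        · refine ⟨fun _ => ?_, fun h => absurd h hm⟩
          rw [ihh.1 hm2z, hvp]
          apply pvRed_eq_of_cong hn
          refine pvCong_trans (pvMulZ_cong (pvCong_trans (pvRed_cong n _)
            (pvMulZ_cong (pvCong_refl n val) hx)) (pvCong_refl n _)) ?_
          rw [pvMulZ_assoc, ← pvPowZ_add]
          have hexp : 2 ^ i + 2 ^ (i + 1) * (m / 2) = 2 ^ i * m := by
            have hmm : m = 2 * (m / 2) + 1 := by omega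
            rw [pow_succ]
            nlinarith [hmm]
          rw [hexp]
          exact pvCong_refl n _
      · rw [if_neg hodd]
        have hm2 : m % 2 = 0 := by
          rcases Nat.mod_two_eq_zero_or_one m with h | h
          · exact h
          · exact absurd (hbit.mpr h) hodd
        have ihh := ih (m / 2) (by omega) (i + 1) (p * 2) (by omega)
          (pvSqA x.1 x.2 z n) val (by rw [hpe, pow_succ]) hsh' hx'
        have hm2z : m / 2 ≠ 0 := by omega
        refine ⟨fun _ => ?_, fun h => absurd h hm⟩
        rw [ihh.1 hm2z]
        have hexp : 2 ^ (i + 1) * (m / 2) = 2 ^ i * m := by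
          have h2 : m = 2 * (m / 2) := by omega
          rw [pow_succ]
          nlinarith [h2]
        rw [hexp]

-- ===== VERDICT (by name: the statement is the Claim_ definition above) =====
theorem a_plus_b_root_z_power_k_mod_n_spec : Claim_equal_a_plus_b_root_z_power_k_mod_n := by
  intro a b z k n hdom hpre
  unfold Spec_a_plus_b_root_z_power_k_mod_n
  by_cases hk : 1 ≤ k
  · have hn := hpre hk
    have hKne : k.toNat ≠ 0 := by omega
    have h := (pvLoop_eq (a, b) z n k hn (by omega) k.toNat 0 1 (by omega) (a, b) (1, 0)
      (by norm_num) (by simp) (by rw [pow_zero, pvPowZ_one]; exact pvCong_refl n (a, b))).1 hKne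
    unfold a_plus_b_root_z_power_k_mod_n
    rw [h, pvAlt_eq a b z n hn k.toNat k rfl hk]
    simp [pvMulZ_one_left]
  · unfold a_plus_b_root_z_power_k_mod_n
    rw [pvLoopA, dif_neg (by omega : ¬ (1:Int) ≤ k)]
    rw [a_plus_b_root_z_power_k_mod_n_alt, if_pos (by omega : k ≤ 0)]
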